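-- pv_equiv track=rewrite | github.com/RafaelBarrantes25/RafaelBarrantes25 | tarea_taller_vectores.py | vectores_iguales
-- ===== SOURCE A (Python) =====
-- def vectores_iguales(vector1,vector2):
--     """
--     Revisa si dos vectores son iguales
--     """
--     if len(vector1) != len(vector2):
--         return False
--     elif vector1 == []:
--         return True
--     elif vector1[0] == vector2[0]:
--         return vectores_iguales(vector1[1:],vector2[1:])
--     else:
--         return False
-- ===== SOURCE B (Python) =====
-- def vectores_iguales(vector1, vector2):
--     """
--     Revisa si dos vectores son iguales
--     """
--     if len(vector1) != len(vector2):
--         return False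
--     for i in range(len(vector1)):
--         if vector1[i] != vector2[i]:
--             return False
--     return True
-- ===== Notes on version B (the rewrite author's own statement) =====
-- stated objective: faster
-- what changed: Replaced the recursive peel-one-element-and-slice recurrence with a single iterative indexed loop with early exit after one length check, avoiding O(n^2) slice copying.
import Mathlib
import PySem

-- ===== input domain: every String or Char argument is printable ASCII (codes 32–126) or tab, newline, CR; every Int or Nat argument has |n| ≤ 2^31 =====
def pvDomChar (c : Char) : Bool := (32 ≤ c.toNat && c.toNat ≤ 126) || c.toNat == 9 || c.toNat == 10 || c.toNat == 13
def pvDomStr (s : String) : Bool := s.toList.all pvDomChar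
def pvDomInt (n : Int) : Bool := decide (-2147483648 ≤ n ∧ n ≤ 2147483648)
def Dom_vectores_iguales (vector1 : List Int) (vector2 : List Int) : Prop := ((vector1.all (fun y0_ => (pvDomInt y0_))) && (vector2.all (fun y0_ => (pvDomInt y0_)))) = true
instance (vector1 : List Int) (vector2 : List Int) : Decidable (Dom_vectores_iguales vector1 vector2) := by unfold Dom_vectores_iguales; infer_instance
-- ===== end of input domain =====

-- B replaces A's recursive slice-based recurrence with a single iterative indexed loop with early exit (faster: no O(n) slice copies per step).


-- ===== PORT A =====
-- recursion: compare lengths, peel the heads, recurse on the tail slices [1:]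
def vectores_iguales (vector1 : List Int) (vector2 : List Int) : Bool :=
  if vector1.length ≠ vector2.length then false
  else if vector1 = [] then true
  else match vector1, vector2 with
    | a :: t1, b :: t2 =>
        -- vector1[0] == vector2[0] then recurse on vector1[1:], vector2[1:]
        if a = b then vectores_iguales t1 t2 else false
    | _, _ => false   -- unreachable: lengths equal and vector1 ≠ []

-- ===== PORT B =====
-- for i in range(len(vector1)): early-exit loop; `fuel` counts the remaining iterations
def vi_loop (vector1 : List Int) (vector2 : List Int) (i : Nat) : Nat → Bool
  | 0 => true
  | fuel + 1 =>
      if vector1.getD i 0 ≠ vector2.getD i 0 then false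
      else vi_loop vector1 vector2 (i + 1) fuel

def vectores_iguales_alt (vector1 : List Int) (vector2 : List Int) : Bool :=
  if vector1.length ≠ vector2.length then false
  else vi_loop vector1 vector2 0 vector1.length

-- ===== PRECONDITION & SPEC =====
def Spec_vectores_iguales (vector1 : List Int) (vector2 : List Int) (out : Bool) : Prop := out = vectores_iguales_alt vector1 vector2
instance (vector1 : List Int) (vector2 : List Int) (out : Bool) : Decidable (Spec_vectores_iguales vector1 vector2 out) := by unfold Spec_vectores_iguales; infer_instance

-- ===== CLAIM (what is proved, stated in full; the proofs are below) =====
def Claim_equal_vectores_iguales : Prop := ∀ (vector1 : List Int) (vector2 : List Int), Dom_vectores_iguales vector1 vector2 → Spec_vectores_iguales vector1 vector2 (vectores_iguales vector1 vector2)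

-- ===== LEMMAS AND PROOFS =====

-- shifting the index past the heads = running the loop on the tails
theorem vi_loop_cons (a b : Int) (t1 t2 : List Int) (i fuel : Nat) :
    vi_loop (a :: t1) (b :: t2) (i + 1) fuel = vi_loop t1 t2 i fuel := by
  induction fuel generalizing i with
  | zero => rfl
  | succ n ih => simp [vi_loop, ih]

theorem vectores_iguales_eq (vector1 vector2 : List Int) :
    vectores_iguales vector1 vector2 = vectores_iguales_alt vector1 vector2 := by
  induction vector1 generalizing vector2 with
  | nil =>
    cases vector2 <;> simp [vectores_iguales, vectores_iguales_alt, vi_loop]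
  | cons a t1 ih =>
    cases vector2 with
    | nil => simp [vectores_iguales, vectores_iguales_alt]
    | cons b t2 =>
      by_cases hlen : t1.length = t2.length
      · by_cases hab : a = b
        · have h1 : vectores_iguales (a :: t1) (b :: t2) = vectores_iguales t1 t2 := by
            simp [vectores_iguales, hlen, hab]
          have h2 : vectores_iguales_alt (a :: t1) (b :: t2) = vi_loop t1 t2 0 t1.length := by
            simp only [vectores_iguales_alt, List.length_cons, hlen, ne_eq, not_true_eq_false,
              if_false, vi_loop]
            rw [if_neg (by simp [hab]), vi_loop_cons]
          rw [h1, h2, ih t2, vectores_iguales_alt, if_neg (by simp [hlen])]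
        · have h2 : vectores_iguales_alt (a :: t1) (b :: t2) = false := by
            simp only [vectores_iguales_alt, List.length_cons, hlen, ne_eq, not_true_eq_false,
              if_false, vi_loop]
            rw [if_pos (by simp [hab])]
          simp [vectores_iguales, hab, h2]
      · simp [vectores_iguales, vectores_iguales_alt, hlen]

-- ===== VERDICT (by name: the statement is the Claim_ definition above) =====
theorem vectores_iguales_spec : Claim_equal_vectores_iguales := by
  intro v1 v2 _
  exact vectores_iguales_eq v1 v2
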